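-- pv_equiv track=rewrite | github.com/nathanzjin/fun-math-problems | pentomino/main.py | format_pentomino
-- ===== SOURCE A (Python) =====
-- grid = [[i * 10 + j + 1 for j in range(10)] for i in range(10)]
--
-- def format_pentomino(cells):
--     min_row = min(x for x, y in cells)
--     max_row = max(x for x, y in cells)
--     min_col = min(y for x, y in cells)
--     max_col = max(y for x, y in cells)
--
--     output = []
--     for x in range(min_row, max_row + 1):
--         row = []
--         for y in range(min_col, max_col + 1):
--             if (x, y) in cells:
--                 row.append(f"{grid[x][y]:3}")  # 3-digit width for alignment
--             else:
--                 row.append("   ")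
--         output.append(" ".join(row).rstrip())
--     return "\n".join(output)
-- ===== SOURCE B (Python) =====
-- grid = [[i * 10 + j + 1 for j in range(10)] for i in range(10)]
--
-- def format_pentomino(cells):
--     min_row = min(x for x, y in cells)
--     max_row = max(x for x, y in cells)
--     min_col = min(y for x, y in cells)
--     max_col = max(y for x, y in cells)
--
--     canvas = [["   "] * (max_col - min_col + 1) for _ in range(max_row - min_row + 1)]
--     for x, y in cells:
--         canvas[x - min_row][y - min_col] = f"{grid[x][y]:3}"
--     return "\n".join(" ".join(row).rstrip() for row in canvas)
-- ===== Notes on version B (the rewrite author's own statement) =====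
-- stated objective: faster
-- what changed: B replaces A's per-rectangle-cell membership scan over cells with a single pass over cells that writes each formatted value into a pre-allocated 2-D canvas of blanks, then joins the rows.
import Mathlib
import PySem

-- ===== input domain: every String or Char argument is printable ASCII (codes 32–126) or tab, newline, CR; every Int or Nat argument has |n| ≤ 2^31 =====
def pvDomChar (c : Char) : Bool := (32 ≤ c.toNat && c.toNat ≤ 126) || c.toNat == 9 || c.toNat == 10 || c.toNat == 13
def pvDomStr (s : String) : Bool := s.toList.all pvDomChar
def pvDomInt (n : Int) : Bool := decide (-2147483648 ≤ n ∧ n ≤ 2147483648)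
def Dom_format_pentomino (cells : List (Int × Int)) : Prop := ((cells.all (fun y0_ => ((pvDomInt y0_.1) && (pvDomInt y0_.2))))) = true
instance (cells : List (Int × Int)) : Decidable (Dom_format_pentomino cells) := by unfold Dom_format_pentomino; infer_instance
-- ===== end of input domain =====

-- B fills a pre-allocated blank canvas in one pass over cells instead of scanning cells for
-- every bounding-box position (objective: faster; return value only — no mutation observable).


-- ===== PORT A =====
def pvBlank : List Char := [' ', ' ', ' ']

-- f"{n:3}": decimal digits of n right-justified to width 3 with spaces (exact for int values)
def pvFmt3 (n : Int) : List Char :=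
  List.replicate (3 - (PySem.Int.toChars n).length) ' ' ++ PySem.Int.toChars n

-- module-level: grid = [[i * 10 + j + 1 for j in range(10)] for i in range(10)]
def pvGrid : List (List Int) :=
  (PySem.List.pyRange 0 10 1).map (fun i =>
    (PySem.List.pyRange 0 10 1).map (fun j => i * 10 + j + 1))

-- f"{grid[x][y]:3}" — total via pyGetD; Pre_ admits exactly the indices where Python's grid[x][y] returns
def pvCell (x y : Int) : List Char :=
  pvFmt3 (PySem.List.pyGetD (PySem.List.pyGetD pvGrid x []) y 0)

def format_pentomino (cells : List (Int × Int)) : String :=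
  let min_row := (PySem.List.min? (cells.map (·.1)) (fun v => v)).getD 0
  let max_row := (PySem.List.max? (cells.map (·.1)) (fun v => v)).getD 0
  let min_col := (PySem.List.min? (cells.map (·.2)) (fun v => v)).getD 0
  let max_col := (PySem.List.max? (cells.map (·.2)) (fun v => v)).getD 0
  let output := (PySem.List.pyRange min_row (max_row + 1) 1).map (fun x =>
    PySem.Chars.rstrip (PySem.Chars.join [' ']
      ((PySem.List.pyRange min_col (max_col + 1) 1).map (fun y =>
        if (x, y) ∈ cells then pvCell x y else pvBlank))))
  String.ofList (PySem.Chars.join ['\n'] output)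

-- ===== PORT B =====
-- loop body: canvas[x - min_row][y - min_col] = f"{grid[x][y]:3}"  (read row, set entry, set row back)
def pvStep (min_row min_col : Int) (cv : List (List (List Char))) (p : Int × Int) :
    List (List (List Char)) :=
  PySem.List.pySetD cv (p.1 - min_row)
    (PySem.List.pySetD (PySem.List.pyGetD cv (p.1 - min_row) []) (p.2 - min_col)
      (pvCell p.1 p.2))

def format_pentomino_alt (cells : List (Int × Int)) : String :=
  let min_row := (PySem.List.min? (cells.map (·.1)) (fun v => v)).getD 0
  let max_row := (PySem.List.max? (cells.map (·.1)) (fun v => v)).getD 0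
  let min_col := (PySem.List.min? (cells.map (·.2)) (fun v => v)).getD 0
  let max_col := (PySem.List.max? (cells.map (·.2)) (fun v => v)).getD 0
  let canvas0 : List (List (List Char)) :=
    List.replicate (max_row - min_row + 1).toNat
      (List.replicate (max_col - min_col + 1).toNat pvBlank)
  let canvas := cells.foldl (pvStep min_row min_col) canvas0
  String.ofList (PySem.Chars.join ['\n']
    (canvas.map (fun row => PySem.Chars.rstrip (PySem.Chars.join [' '] row))))

-- ===== PRECONDITION & SPEC =====
-- Pre_ excludes exactly the inputs where A raises: empty cells (ValueError from min()) and any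
-- coordinate outside [-10, 9] (IndexError indexing the module-level 10×10 grid; negative
-- indices down to -10 wrap around in Python and A returns there, so they stay inside Pre_).
def Pre_format_pentomino (cells : List (Int × Int)) : Prop :=
  cells ≠ [] ∧ ∀ p ∈ cells, -10 ≤ p.1 ∧ p.1 ≤ 9 ∧ -10 ≤ p.2 ∧ p.2 ≤ 9
instance (cells : List (Int × Int)) : Decidable (Pre_format_pentomino cells) := by
  unfold Pre_format_pentomino; infer_instance

def pvWitness_format_pentomino : (List (Int × Int)) := [(0, 0), (1, 0), (1, 1), (2, 1), (2, 2)]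

def Spec_format_pentomino (cells : List (Int × Int)) (out : String) : Prop :=
  out = format_pentomino_alt cells
instance (cells : List (Int × Int)) (out : String) : Decidable (Spec_format_pentomino cells out) := by
  unfold Spec_format_pentomino; infer_instance

-- ===== CLAIM (what is proved, stated in full; the proofs are below) =====
def Claim_equal_format_pentomino : Prop := ∀ (cells : List (Int × Int)),
  Dom_format_pentomino cells → Pre_format_pentomino cells →
  Spec_format_pentomino cells (format_pentomino cells)

-- ===== LEMMAS AND PROOFS =====

-- total double-indexing of the canvas
def pvEntry (cv : List (List (List Char))) (i j : Nat) : List Char :=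
  (cv.getD i []).getD j pvBlank

lemma pv_getD_set {α : Type} (d : α) (l : List α) (n : Nat) (r : α) (i : Nat) (h : n < l.length) :
    (l.set n r).getD i d = if i = n then r else l.getD i d := by
  rcases eq_or_ne i n with rfl | hne
  · simp [List.getD_eq_getElem?_getD, h]
  · simp [List.getD_eq_getElem?_getD, List.getElem?_set_ne (Ne.symm hne), hne]

lemma pvStep_length (mr mc : Int) (cv : List (List (List Char))) (p : Int × Int) :
    (pvStep mr mc cv p).length = cv.length := by
  simp [pvStep, PySem.List.length_pySetD]

lemma pvStep_rows (mr mc : Int) (cv : List (List (List Char))) (p : Int × Int) (W : Nat)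
    (hW : ∀ row ∈ cv, row.length = W)
    (hb : mr ≤ p.1 ∧ p.1 < mr + cv.length ∧ mc ≤ p.2 ∧ p.2 < mc + W) :
    ∀ row ∈ pvStep mr mc cv p, row.length = W := by
  obtain ⟨h1, h2, h3, h4⟩ := hb
  intro row hrow
  rw [pvStep, PySem.List.pySetD_of_nonneg _ _ (by omega)] at hrow
  rcases List.mem_or_eq_of_mem_set hrow with h | h
  · exact hW _ h
  · subst h
    rw [PySem.List.pySetD_of_nonneg _ _ (by omega), List.length_set]
    have hir : p.1 - mr < (cv.length : Int) := by omega
    rw [PySem.List.pyGetD_eq_getElem _ _ (by omega) hir]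
    exact hW _ (List.getElem_mem _)

lemma pvStep_entry (mr mc : Int) (cv : List (List (List Char))) (p : Int × Int) (W : Nat)
    (hW : ∀ row ∈ cv, row.length = W)
    (hb : mr ≤ p.1 ∧ p.1 < mr + cv.length ∧ mc ≤ p.2 ∧ p.2 < mc + W)
    (i j : Nat) (hi : i < cv.length) (hj : j < W) :
    pvEntry (pvStep mr mc cv p) i j =
      if (mr + (i : Int), mc + (j : Int)) = p then pvCell p.1 p.2 else pvEntry cv i j := by
  obtain ⟨a, b⟩ := p
  obtain ⟨h1, h2, h3, h4⟩ := hb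
  dsimp only at h1 h2 h3 h4 ⊢
  have hI : (a - mr).toNat < cv.length := by omega
  have hWr : (cv[(a - mr).toNat]).length = W := hW _ (List.getElem_mem _)
  rw [pvStep, PySem.List.pySetD_of_nonneg _ _ (by omega),
      PySem.List.pySetD_of_nonneg _ _ (by omega),
      PySem.List.pyGetD_eq_getElem _ _ (by omega) (by omega)]
  unfold pvEntry
  rw [pv_getD_set _ _ _ _ _ hI]
  by_cases hii : i = (a - mr).toNat
  · rw [if_pos hii, pv_getD_set _ _ _ _ _ (by rw [hWr]; omega), hii]
    by_cases hjj : j = (b - mc).toNat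
    · rw [if_pos hjj, if_pos (by simp only [Prod.mk.injEq]; omega)]
    · rw [if_neg hjj, if_neg (by simp only [Prod.mk.injEq, not_and]; omega),
          List.getD_eq_getElem cv _ (by simpa using hI),
          List.getD_eq_getElem _ _ (by rw [hWr]; omega)]
  · rw [if_neg hii, if_neg (by simp only [Prod.mk.injEq, not_and]; omega)]

lemma pvFold_length (mr mc : Int) (l : List (Int × Int)) (cv : List (List (List Char))) :
    (l.foldl (pvStep mr mc) cv).length = cv.length := by
  induction l generalizing cv with
  | nil => rfl
  | cons p t ih => simp only [List.foldl_cons]; rw [ih, pvStep_length]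

lemma pvFold_rows (mr mc : Int) (l : List (Int × Int)) (cv : List (List (List Char))) (W : Nat)
    (hW : ∀ row ∈ cv, row.length = W)
    (hb : ∀ p ∈ l, mr ≤ p.1 ∧ p.1 < mr + cv.length ∧ mc ≤ p.2 ∧ p.2 < mc + W) :
    ∀ row ∈ l.foldl (pvStep mr mc) cv, row.length = W := by
  induction l generalizing cv with
  | nil => exact hW
  | cons p t ih =>
    simp only [List.foldl_cons]
    refine ih _ (pvStep_rows mr mc cv p W hW (hb p List.mem_cons_self)) ?_
    intro q hq
    rw [pvStep_length]
    exact hb q (List.mem_cons_of_mem _ hq)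

lemma pvFold_entry (mr mc : Int) (l : List (Int × Int)) (cv : List (List (List Char))) (W : Nat)
    (hW : ∀ row ∈ cv, row.length = W)
    (hb : ∀ p ∈ l, mr ≤ p.1 ∧ p.1 < mr + cv.length ∧ mc ≤ p.2 ∧ p.2 < mc + W)
    (i j : Nat) (hi : i < cv.length) (hj : j < W) :
    pvEntry (l.foldl (pvStep mr mc) cv) i j =
      if (mr + (i : Int), mc + (j : Int)) ∈ l then pvCell (mr + i) (mc + j)
      else pvEntry cv i j := by
  induction l generalizing cv with
  | nil => simp
  | cons p t ih =>
    have hbp := hb p List.mem_cons_self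
    have hW' := pvStep_rows mr mc cv p W hW hbp
    have hl' : (pvStep mr mc cv p).length = cv.length := pvStep_length mr mc cv p
    simp only [List.foldl_cons]
    rw [ih (pvStep mr mc cv p) hW'
        (by intro q hq; rw [hl']; exact hb q (List.mem_cons_of_mem _ hq))
        (by omega)]
    rw [pvStep_entry mr mc cv p W hW hbp i j hi hj]
    by_cases ht : (mr + (i : Int), mc + (j : Int)) ∈ t
    · rw [if_pos ht, if_pos (List.mem_cons_of_mem _ ht)]
    · rw [if_neg ht]
      by_cases hp : (mr + (i : Int), mc + (j : Int)) = p
      · rw [if_pos hp, if_pos (by rw [hp]; exact List.mem_cons_self), ← hp]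
      · rw [if_neg hp, if_neg (by simp [List.mem_cons, hp, ht])]

-- the heart: the filled canvas IS A's rectangle of rows
lemma pvCanvas_eq (cells : List (Int × Int)) (mr Mr mc Mc : Int)
    (hrc : mr ≤ Mr) (hcc : mc ≤ Mc)
    (hb : ∀ p ∈ cells, mr ≤ p.1 ∧ p.1 ≤ Mr ∧ mc ≤ p.2 ∧ p.2 ≤ Mc) :
    cells.foldl (pvStep mr mc)
      (List.replicate (Mr - mr + 1).toNat (List.replicate (Mc - mc + 1).toNat pvBlank)) =
    (PySem.List.pyRange mr (Mr + 1) 1).map (fun x =>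
      (PySem.List.pyRange mc (Mc + 1) 1).map (fun y =>
        if (x, y) ∈ cells then pvCell x y else pvBlank)) := by
  set H : Nat := (Mr - mr + 1).toNat with hH
  set W : Nat := (Mc - mc + 1).toNat with hWdef
  set cv0 := List.replicate H (List.replicate W pvBlank) with hcv0
  have hlen0 : cv0.length = H := by simp [hcv0]
  have hrows0 : ∀ row ∈ cv0, row.length = W := by
    intro row hr; rw [List.eq_of_mem_replicate hr]; simp
  have hb' : ∀ p ∈ cells, mr ≤ p.1 ∧ p.1 < mr + cv0.length ∧ mc ≤ p.2 ∧ p.2 < mc + W := by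
    intro p hp; have := hb p hp
    exact ⟨this.1, by rw [hlen0]; omega, this.2.2.1, by omega⟩
  apply List.ext_getElem
  · rw [pvFold_length, hlen0, List.length_map, PySem.List.length_pyRange_one]; omega
  intro i hi1 hi2
  have hiH : i < H := by rwa [pvFold_length, hlen0] at hi1
  have hrowsF := pvFold_rows mr mc cells cv0 W hrows0 hb'
  rw [List.getElem_map, PySem.List.getElem_pyRange_one]
  apply List.ext_getElem
  · rw [List.length_map, PySem.List.length_pyRange_one]
    rw [hrowsF _ (List.getElem_mem _)]; omega
  intro j hj1 hj2
  have hjW : j < W := by rwa [hrowsF _ (List.getElem_mem _)] at hj1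
  rw [List.getElem_map, PySem.List.getElem_pyRange_one]
  have hE := pvFold_entry mr mc cells cv0 W hrows0 hb' i j (by omega) hjW
  have hiF : i < (List.foldl (pvStep mr mc) cv0 cells).length := by
    rw [pvFold_length, hlen0]; omega
  rw [pvEntry,
      show ((List.foldl (pvStep mr mc) cv0 cells).getD i []) =
        (List.foldl (pvStep mr mc) cv0 cells)[i] from List.getD_eq_getElem _ _ hiF] at hE
  rw [List.getD_eq_getElem _ _ (by rw [hrowsF _ (List.getElem_mem _)]; omega)] at hE
  rw [hE]
  have hE0 : pvEntry cv0 i j = pvBlank := by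
    simp [pvEntry, hcv0, List.getD_eq_getElem?_getD, hiH, hjW]
  rw [hE0]

theorem pv_main (cells : List (Int × Int)) (hpre : Pre_format_pentomino cells) :
    format_pentomino cells = format_pentomino_alt cells := by
  obtain ⟨hne, _⟩ := hpre
  have hm1 : cells.map (·.1) ≠ [] := by simpa using hne
  have hm2 : cells.map (·.2) ≠ [] := by simpa using hne
  obtain ⟨mr, h1⟩ : ∃ v, PySem.List.min? (cells.map (·.1)) (fun v => v) = some v := by
    rcases h : PySem.List.min? (cells.map (·.1)) (fun v => v) with _ | v
    · exact absurd ((PySem.List.min?_eq_none_iff _ _).mp h) hm1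
    · exact ⟨v, h⟩
  obtain ⟨Mr, h2⟩ : ∃ v, PySem.List.max? (cells.map (·.1)) (fun v => v) = some v := by
    rcases h : PySem.List.max? (cells.map (·.1)) (fun v => v) with _ | v
    · exact absurd ((PySem.List.max?_eq_none_iff _ _).mp h) hm1
    · exact ⟨v, h⟩
  obtain ⟨mc, h3⟩ : ∃ v, PySem.List.min? (cells.map (·.2)) (fun v => v) = some v := by
    rcases h : PySem.List.min? (cells.map (·.2)) (fun v => v) with _ | v
    · exact absurd ((PySem.List.min?_eq_none_iff _ _).mp h) hm2
    · exact ⟨v, h⟩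
  obtain ⟨Mc, h4⟩ : ∃ v, PySem.List.max? (cells.map (·.2)) (fun v => v) = some v := by
    rcases h : PySem.List.max? (cells.map (·.2)) (fun v => v) with _ | v
    · exact absurd ((PySem.List.max?_eq_none_iff _ _).mp h) hm2
    · exact ⟨v, h⟩
  have hminr := PySem.List.min?_isMin h1
  have hmaxr := PySem.List.max?_isMax h2
  have hminc := PySem.List.min?_isMin h3
  have hmaxc := PySem.List.max?_isMax h4
  have hrc : mr ≤ Mr := hminr _ (PySem.List.max?_mem h2)
  have hcc : mc ≤ Mc := hminc _ (PySem.List.max?_mem h4)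
  have hb : ∀ p ∈ cells, mr ≤ p.1 ∧ p.1 ≤ Mr ∧ mc ≤ p.2 ∧ p.2 ≤ Mc := by
    intro p hp
    exact ⟨hminr _ (List.mem_map_of_mem hp), hmaxr _ (List.mem_map_of_mem hp),
           hminc _ (List.mem_map_of_mem hp), hmaxc _ (List.mem_map_of_mem hp)⟩
  unfold format_pentomino format_pentomino_alt
  rw [h1, h2, h3, h4]
  simp only [Option.getD_some]
  rw [pvCanvas_eq cells mr Mr mc Mc hrc hcc hb, List.map_map]
  rfl

-- ===== VERDICT (by name: the statement is the Claim_ definition above) =====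
theorem format_pentomino_spec : Claim_equal_format_pentomino := by
  intro cells _ hpre
  exact pv_main cells hpre
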